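-- pv_equiv track=rewrite | github.com/wakuwakustudyworld/ipa-pseudocode-toolkit | src/ipa_pseudocode/parser/grammar.py | _split_compound_condition
-- ===== SOURCE A (Python) =====
-- def _split_compound_condition(text: str) -> tuple[str, str, str] | None:
--     """and/or でトップレベル分割を試みる"""
--     for keyword in (" and ", " or "):
--         depth = 0
--         i = 0
--         while i < len(text):
--             ch = text[i]
--             if ch == "(":
--                 depth += 1
--             elif ch == ")":
--                 depth -= 1
--             elif depth == 0 and text[i : i + len(keyword)] == keyword:
--                 left = text[:i].strip()
--                 right = text[i + len(keyword) :].strip()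
--                 op = keyword.strip()
--                 return (op, left, right)
--             i += 1
--     return None
-- ===== SOURCE B (Python) =====
-- def _split_compound_condition(text: str) -> tuple[str, str, str] | None:
--     """Single left-to-right scan recording the first top-level ' and ' and ' or '."""
--     depth = 0
--     and_idx = None
--     or_idx = None
--     for i, ch in enumerate(text):
--         if ch == "(":
--             depth += 1
--         elif ch == ")":
--             depth -= 1
--         elif depth == 0:
--             if and_idx is None and text[i:i + 5] == " and ":
--                 and_idx = i
--             if or_idx is None and text[i:i + 4] == " or ":
--                 or_idx = i
--     if and_idx is not None:
--         op, idx, klen = "and", and_idx, 5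
--     elif or_idx is not None:
--         op, idx, klen = "or", or_idx, 4
--     else:
--         return None
--     return (op, text[:idx].strip(), text[idx + klen:].strip())
-- ===== Notes on version B (the rewrite author's own statement) =====
-- stated objective: faster
-- what changed: Replaces A's two full keyword passes (one scan per keyword) by a single left-to-right depth-tracking scan that records the first top-level index of each keyword, then picks the operator afterwards.
import Mathlib
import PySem

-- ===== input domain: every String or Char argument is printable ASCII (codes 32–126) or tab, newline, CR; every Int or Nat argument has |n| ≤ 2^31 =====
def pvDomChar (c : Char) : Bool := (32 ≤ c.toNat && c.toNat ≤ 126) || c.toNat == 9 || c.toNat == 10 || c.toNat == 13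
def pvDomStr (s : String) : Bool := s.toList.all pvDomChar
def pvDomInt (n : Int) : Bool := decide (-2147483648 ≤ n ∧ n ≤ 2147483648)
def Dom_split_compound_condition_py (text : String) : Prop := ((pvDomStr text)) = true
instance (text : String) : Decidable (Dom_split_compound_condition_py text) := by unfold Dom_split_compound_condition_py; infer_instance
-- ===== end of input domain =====

-- B does one depth-tracking scan recording first top-level ' and '/' or ' indices instead of A's two keyword passes; equal return values proved.

-- ===== PORT A =====
-- A's inner while-loop for one keyword: index i, paren depth, slice comparison, returns the rendered triple.
def pvLoopA (kw text : List Char) (i : Nat) (depth : Int) : Option (String × String × String) :=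
  if i < text.length then
    let ch := text.getD i ' '
    if ch = '(' then pvLoopA kw text (i+1) (depth+1)
    else if ch = ')' then pvLoopA kw text (i+1) (depth-1)
    else if depth = 0 ∧ (text.drop i).take kw.length = kw then
      some (String.ofList (PySem.Chars.strip kw),
            String.ofList (PySem.Chars.strip (text.take i)),
            String.ofList (PySem.Chars.strip (text.drop (i + kw.length))))
    else pvLoopA kw text (i+1) depth
  else none
termination_by text.length - i

def split_compound_condition_py (text : String) : Option (String × String × String) :=
  match pvLoopA " and ".toList text.toList 0 0 with
  | some r => some r
  | none => pvLoopA " or ".toList text.toList 0 0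

-- ===== PORT B =====
-- B's single scan: carries depth and the first top-level match index of each keyword.
def pvLoopB (text : List Char) (i : Nat) (depth : Int) (aIdx oIdx : Option Nat) :
    Option Nat × Option Nat :=
  if i < text.length then
    let ch := text.getD i ' '
    if ch = '(' then pvLoopB text (i+1) (depth+1) aIdx oIdx
    else if ch = ')' then pvLoopB text (i+1) (depth-1) aIdx oIdx
    else if depth = 0 then
      let aIdx' := if aIdx = none ∧ (text.drop i).take 5 = " and ".toList then some i else aIdx
      let oIdx' := if oIdx = none ∧ (text.drop i).take 4 = " or ".toList then some i else oIdx
      pvLoopB text (i+1) depth aIdx' oIdx'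
    else pvLoopB text (i+1) depth aIdx oIdx
  else (aIdx, oIdx)
termination_by text.length - i

def split_compound_condition_py_alt (text : String) : Option (String × String × String) :=
  match pvLoopB text.toList 0 0 none none with
  | (some j, _) => some ("and", String.ofList (PySem.Chars.strip (text.toList.take j)),
                          String.ofList (PySem.Chars.strip (text.toList.drop (j+5))))
  | (none, some j) => some ("or", String.ofList (PySem.Chars.strip (text.toList.take j)),
                             String.ofList (PySem.Chars.strip (text.toList.drop (j+4))))
  | (none, none) => none

-- ===== PRECONDITION & SPEC =====
def Spec_split_compound_condition_py (text : String) (out : Option (String × String × String)) : Prop := out = split_compound_condition_py_alt text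
instance (text : String) (out : Option (String × String × String)) : Decidable (Spec_split_compound_condition_py text out) := by unfold Spec_split_compound_condition_py; infer_instance

-- ===== CLAIM (what is proved, stated in full; the proofs are below) =====
def Claim_equal_split_compound_condition_py : Prop := ∀ (text : String), Dom_split_compound_condition_py text → Spec_split_compound_condition_py text (split_compound_condition_py text)

-- ===== LEMMAS AND PROOFS =====

-- First index ≥ i at which, with running depth d, a top-level occurrence of kw starts.
def pvFind (kw text : List Char) (i : Nat) (d : Int) : Option Nat :=
  if i < text.length then
    let ch := text.getD i ' '
    if ch = '(' then pvFind kw text (i+1) (d+1)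
    else if ch = ')' then pvFind kw text (i+1) (d-1)
    else if d = 0 ∧ (text.drop i).take kw.length = kw then some i
    else pvFind kw text (i+1) d
  else none
termination_by text.length - i

def pvRender (kw text : List Char) (j : Nat) : String × String × String :=
  (String.ofList (PySem.Chars.strip kw),
   String.ofList (PySem.Chars.strip (text.take j)),
   String.ofList (PySem.Chars.strip (text.drop (j + kw.length))))

theorem pvLoopA_eq (kw text : List Char) (i : Nat) (d : Int) :
    pvLoopA kw text i d = (pvFind kw text i d).map (pvRender kw text) := by
  by_cases h : i < text.length
  · rw [pvLoopA, pvFind]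
    simp only [h, if_pos]
    split_ifs with h1 h2 h3
    · exact pvLoopA_eq kw text (i+1) (d+1)
    · exact pvLoopA_eq kw text (i+1) (d-1)
    · simp [pvRender]
    · exact pvLoopA_eq kw text (i+1) d
  · rw [pvLoopA, pvFind]; simp [h]
termination_by text.length - i

def pvOrO (a b : Option Nat) : Option Nat :=
  match a with
  | some x => some x
  | none => b

theorem pvFind_unfold (kw text : List Char) (i : Nat) (d : Int) (h : i < text.length) :
    pvFind kw text i d =
      (if text.getD i ' ' = '(' then pvFind kw text (i+1) (d+1)
       else if text.getD i ' ' = ')' then pvFind kw text (i+1) (d-1)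
       else if d = 0 ∧ (text.drop i).take kw.length = kw then some i
       else pvFind kw text (i+1) d) := by
  rw [pvFind]; simp [h]

theorem pvFind_stop (kw text : List Char) (i : Nat) (d : Int) (h : ¬ i < text.length) :
    pvFind kw text i d = none := by
  rw [pvFind]; simp [h]

theorem pvStep (x : Option Nat) (c : Prop) [Decidable c] (i : Nat) (r : Option Nat) :
    pvOrO (if x = none ∧ c then some i else x) r = pvOrO x (if c then some i else r) := by
  cases x <;> split_ifs <;> simp_all [pvOrO]

theorem pvLoopB_eq (text : List Char) (i : Nat) (d : Int) (a o : Option Nat) :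
    pvLoopB text i d a o =
      (pvOrO a (pvFind " and ".toList text i d), pvOrO o (pvFind " or ".toList text i d)) := by
  by_cases h : i < text.length
  · rw [pvLoopB]
    simp only [h, if_pos]
    by_cases h1 : text.getD i ' ' = '('
    · rw [if_pos h1, pvLoopB_eq text (i+1) (d+1) a o,
          pvFind_unfold " and ".toList text i d h, pvFind_unfold " or ".toList text i d h,
          if_pos h1, if_pos h1]
    · by_cases h2 : text.getD i ' ' = ')'
      · rw [if_neg h1, if_pos h2, pvLoopB_eq text (i+1) (d-1) a o,
            pvFind_unfold " and ".toList text i d h, pvFind_unfold " or ".toList text i d h,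
            if_neg h1, if_neg h1, if_pos h2, if_pos h2]
      · by_cases h3 : d = 0
        · rw [if_neg h1, if_neg h2, if_pos h3,
              pvLoopB_eq text (i+1) d,
              pvFind_unfold " and ".toList text i d h, pvFind_unfold " or ".toList text i d h,
              if_neg h1, if_neg h1, if_neg h2, if_neg h2]
          have e5 : (" and ".toList).length = 5 := by decide
          have e4 : (" or ".toList).length = 4 := by decide
          subst h3
          simp only [true_and, e5, e4]
          rw [pvStep, pvStep]
        · rw [if_neg h1, if_neg h2, if_neg h3, pvLoopB_eq text (i+1) d a o,
              pvFind_unfold " and ".toList text i d h, pvFind_unfold " or ".toList text i d h,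
              if_neg h1, if_neg h1, if_neg h2, if_neg h2,
              if_neg (by simp [h3] : ¬ (d = 0 ∧ (text.drop i).take (" and ".toList).length = " and ".toList)),
              if_neg (by simp [h3] : ¬ (d = 0 ∧ (text.drop i).take (" or ".toList).length = " or ".toList))]
  · rw [pvLoopB, pvFind_stop _ _ _ _ h, pvFind_stop _ _ _ _ h]
    simp only [h, if_neg, not_false_iff]
    cases a <;> cases o <;> rfl
termination_by text.length - i

-- ===== VERDICT (by name: the statement is the Claim_ definition above) =====
theorem split_compound_condition_py_spec : Claim_equal_split_compound_condition_py := by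
  intro text _
  unfold Spec_split_compound_condition_py split_compound_condition_py split_compound_condition_py_alt
  rw [pvLoopA_eq, pvLoopA_eq, pvLoopB_eq]
  cases hA : pvFind " and ".toList text.toList 0 0 with
  | some j => simp [pvOrO, pvRender] ; decide
  | none =>
      cases hO : pvFind " or ".toList text.toList 0 0 with
      | some j => simp [pvOrO, pvRender] ; decide
      | none => simp [pvOrO]
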